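-- pv_equiv track=rewrite | github.com/kufupa/pi05-cube-FT | cube_dataset/gt_export.py | _build_trim_window
-- ===== SOURCE A (Python) =====
-- N_PRE = 80
--
-- N_POST = 60
--
-- L_MIN = 100
--
-- def _build_trim_window(t_star: int, T: int) -> tuple[int, int] | None:
--     t_anchor = t_star
--     t_start = max(0, t_anchor - N_PRE)
--     t_end = min(T - 1, t_anchor + N_POST)
--     span = t_end - t_start + 1
--     while span < L_MIN:
--         expanded = False
--         if t_start > 0:
--             t_start -= 1
--             expanded = True
--         span = t_end - t_start + 1
--         if span >= L_MIN:
--             break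
--         if t_end < T - 1:
--             t_end += 1
--             expanded = True
--         span = t_end - t_start + 1
--         if span >= L_MIN:
--             break
--         if not expanded:
--             break
--     if t_end - t_start + 1 < L_MIN:
--         return None
--     return t_start, t_end
-- ===== SOURCE B (Python) =====
-- N_PRE = 80
-- N_POST = 60
-- L_MIN = 100
--
-- def _build_trim_window(t_star: int, T: int) -> tuple[int, int] | None:
--     t_start = max(0, t_star - N_PRE)
--     t_end = min(T - 1, t_star + N_POST)
--     span = t_end - t_start + 1
--     if span < L_MIN:
--         need = L_MIN - span
--         left_room = t_start
--         right_room = (T - 1) - t_end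
--         m = min(need, left_room + right_room)
--         a = (m + 1) // 2
--         b = m // 2
--         if a > left_room:
--             a = left_room
--             b = m - a
--         elif b > right_room:
--             b = right_room
--             a = m - b
--         t_start -= a
--         t_end += b
--     if t_end - t_start + 1 < L_MIN:
--         return None
--     return t_start, t_end
-- ===== Notes on version B (the rewrite author's own statement) =====
-- stated objective: simpler
-- what changed: Replaces A's one-step-at-a-time while-loop expansion (alternating start/end moves with break checks) by a closed-form arithmetic split of the needed expansion between the available room on each side.
import Mathlib
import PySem

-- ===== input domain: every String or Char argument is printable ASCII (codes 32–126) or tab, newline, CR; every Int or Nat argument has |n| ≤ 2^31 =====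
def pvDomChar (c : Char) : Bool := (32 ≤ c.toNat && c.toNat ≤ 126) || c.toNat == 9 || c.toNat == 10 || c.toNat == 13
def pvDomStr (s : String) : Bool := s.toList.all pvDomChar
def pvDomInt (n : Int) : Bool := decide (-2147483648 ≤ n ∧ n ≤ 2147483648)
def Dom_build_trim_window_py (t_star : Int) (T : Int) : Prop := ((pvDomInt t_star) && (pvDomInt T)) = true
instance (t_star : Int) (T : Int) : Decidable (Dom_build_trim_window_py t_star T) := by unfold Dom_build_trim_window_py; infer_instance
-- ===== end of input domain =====

-- B replaces A's one-step-at-a-time expansion loop by direct arithmetic (closed-form split of the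
-- needed expansion between the two sides); objective: simpler, no measured speed claim.

-- ===== PORT A =====
-- the while-loop of A, state (t_start, t_end); recursion happens exactly when 'expanded'
-- is true and no break fired, so the measure (left room + right room) strictly decreases
def buildTrimLoopA (T t_start t_end : Int) : Int × Int :=
  if t_end - t_start + 1 < 100 then
    if 0 < t_start then
      -- t_start -= 1; expanded = True
      let s' := t_start - 1
      if 100 ≤ t_end - s' + 1 then (s', t_end)
      else if t_end < T - 1 then
        -- t_end += 1
        let e' := t_end + 1
        if 100 ≤ e' - s' + 1 then (s', e')
        else buildTrimLoopA T s' e'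
      else buildTrimLoopA T s' t_end   -- expanded (start moved), loop again
    else
      -- start did not move; span unchanged, still < 100
      if t_end < T - 1 then
        let e' := t_end + 1
        if 100 ≤ e' - t_start + 1 then (t_start, e')
        else buildTrimLoopA T t_start e'
      else (t_start, t_end)            -- not expanded: break
  else (t_start, t_end)
termination_by t_start.toNat + (T - 1 - t_end).toNat
decreasing_by all_goals omega

def build_trim_window_py (t_star : Int) (T : Int) : Option (Int × Int) :=
  let t_anchor := t_star
  let t_start := max 0 (t_anchor - 80)
  let t_end := min (T - 1) (t_anchor + 60)
  let r := buildTrimLoopA T t_start t_end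
  if r.2 - r.1 + 1 < 100 then none else some (r.1, r.2)

-- ===== PORT B =====
def build_trim_window_py_alt (t_star : Int) (T : Int) : Option (Int × Int) :=
  let t_start := max 0 (t_star - 80)
  let t_end := min (T - 1) (t_star + 60)
  let span := t_end - t_start + 1
  let p :=
    if span < 100 then
      let need := 100 - span
      let left_room := t_start
      let right_room := (T - 1) - t_end
      let m := min need (left_room + right_room)
      let a := PySem.Int.floordiv (m + 1) 2
      let b := PySem.Int.floordiv m 2
      let q :=
        if a > left_room then (left_room, m - left_room)
        else if b > right_room then (m - right_room, right_room)
        else (a, b)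
      (t_start - q.1, t_end + q.2)
    else (t_start, t_end)
  if p.2 - p.1 + 1 < 100 then none else some (p.1, p.2)

-- ===== PRECONDITION & SPEC =====
def Spec_build_trim_window_py (t_star : Int) (T : Int) (out : Option (Int × Int)) : Prop := out = build_trim_window_py_alt t_star T
instance (t_star : Int) (T : Int) (out : Option (Int × Int)) : Decidable (Spec_build_trim_window_py t_star T out) := by unfold Spec_build_trim_window_py; infer_instance

-- ===== CLAIM (what is proved, stated in full; the proofs are below) =====
def Claim_equal_build_trim_window_py : Prop := ∀ (t_star : Int) (T : Int), Dom_build_trim_window_py t_star T → Spec_build_trim_window_py t_star T (build_trim_window_py t_star T)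

-- ===== LEMMAS AND PROOFS =====

-- left expansion only: with t_end pinned at T-1, the loop walks t_start down to max 0 (T-100)
lemma loopA_left (T : Int) : ∀ (n : Nat) (s : Int), s.toNat = n → 0 ≤ s →
    buildTrimLoopA T s (T - 1) = if (T - 1) - s + 1 < 100 then (max 0 (T - 100), T - 1) else (s, T - 1) := by
  intro n
  induction n with
  | zero =>
    intro s hn hs
    have hs0 : s = 0 := by omega
    subst hs0
    rw [buildTrimLoopA]
    by_cases h1 : (T - 1) - 0 + 1 < 100
    · rw [if_pos h1, if_neg (by omega : ¬ (0:Int) < 0), if_neg (by omega : ¬ (T - 1) < T - 1), if_pos h1]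
      simp only [Prod.mk.injEq, and_true]
      omega
    · rw [if_neg h1, if_neg h1]
  | succ k ih =>
    intro s hn hs
    have hspos : 0 < s := by omega
    rw [buildTrimLoopA]
    by_cases h1 : (T - 1) - s + 1 < 100
    · rw [if_pos h1, if_pos hspos]
      by_cases h3 : 100 ≤ (T - 1) - (s - 1) + 1
      · rw [if_pos h3, if_pos h1]
        simp only [Prod.mk.injEq, and_true]
        omega
      · rw [if_neg h3, if_neg (by omega : ¬ (T - 1) < T - 1),
            ih (s - 1) (by omega) (by omega), if_pos (by omega), if_pos h1]
    · rw [if_neg h1, if_neg h1]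

-- right expansion only: with t_start pinned at 0, the loop walks t_end up to min 99 (T-1)
lemma loopA_right (T : Int) : ∀ (n : Nat) (e : Int), (T - 1 - e).toNat = n → e ≤ T - 1 →
    buildTrimLoopA T 0 e = if e - 0 + 1 < 100 then (0, min 99 (T - 1)) else (0, e) := by
  intro n
  induction n with
  | zero =>
    intro e hn he
    have he0 : e = T - 1 := by omega
    subst he0
    rw [buildTrimLoopA]
    by_cases h1 : (T - 1) - 0 + 1 < 100
    · rw [if_pos h1, if_neg (by omega : ¬ (0:Int) < 0), if_neg (by omega : ¬ (T - 1) < T - 1), if_pos h1]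
      simp only [Prod.mk.injEq, true_and]
      omega
    · rw [if_neg h1, if_neg h1]
  | succ k ih =>
    intro e hn he
    have hlt : e < T - 1 := by omega
    rw [buildTrimLoopA]
    by_cases h1 : e - 0 + 1 < 100
    · rw [if_pos h1, if_neg (by omega : ¬ (0:Int) < 0), if_pos hlt]
      by_cases h3 : 100 ≤ (e + 1) - 0 + 1
      · rw [if_pos h3, if_pos h1]
        simp only [Prod.mk.injEq, true_and]
        omega
      · rw [if_neg h3, ih (e + 1) (by omega) (by omega), if_pos (by omega), if_pos h1]
    · rw [if_neg h1, if_neg h1]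

-- ===== VERDICT (by name: the statement is the Claim_ definition above) =====
theorem build_trim_window_py_spec : Claim_equal_build_trim_window_py := by
  intro t T _
  unfold Spec_build_trim_window_py
  simp only [build_trim_window_py, build_trim_window_py_alt]
  rw [PySem.Int.floordiv_eq_ediv_of_pos (by omega : (0:Int) < 2),
      PySem.Int.floordiv_eq_ediv_of_pos (by omega : (0:Int) < 2)]
  set s0 : Int := max 0 (t - 80) with hs0
  set e0 : Int := min (T - 1) (t + 60) with he0
  by_cases hspan : e0 - s0 + 1 < 100
  · have hs0nn : 0 ≤ s0 := by omega
    have he0le : e0 ≤ T - 1 := by omega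
    have hside : s0 = 0 ∨ e0 = T - 1 := by omega
    rcases hside with hL | hR
    · rw [hL] at hspan ⊢
      rw [loopA_right T (T - 1 - e0).toNat e0 rfl he0le, if_pos hspan]
      rw [if_pos (by omega : e0 - 0 + 1 < 100)]
      split_ifs <;> first | rfl | omega | (simp only [Option.some.injEq, Prod.mk.injEq]; omega)
    · rw [hR] at hspan ⊢
      rw [loopA_left T s0.toNat s0 rfl hs0nn, if_pos hspan]
      rw [if_pos (by omega : (T - 1) - s0 + 1 < 100)]
      split_ifs <;> first | rfl | omega | (simp only [Option.some.injEq, Prod.mk.injEq]; omega)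
  · rw [buildTrimLoopA, if_neg hspan, if_neg hspan]
    split_ifs <;> rfl
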